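-- pv_equiv track=rewrite | github.com/mahnoorfatima997/macad-thesis-25 | thesis-agents/conversation_progression.py | _assess_readiness_for_advancement
-- ===== SOURCE A (Python) =====
-- from typing import Dict, Any, List, Optional, Tuple
--
-- def _assess_readiness_for_advancement(user_input: str, state: Any) -> bool:
--     """Assess if user is ready to advance to next phase"""
--     input_lower = user_input.lower()
--
--     # Readiness indicators
--     readiness_indicators = [
--         "can you show me", "examples", "demonstrate", "how to",
--         "connect", "relationship", "together", "integrate",
--         "apply", "my project", "implement", "using",
--         "learned", "understand", "feel confident", "realized"
--     ]
--
--     # Count readiness indicators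
--     readiness_count = sum(1 for term in readiness_indicators if term in input_lower)
--
--     # Also consider message length as a basic indicator
--     word_count = len(user_input.split())
--
--     # User is ready if they show multiple readiness indicators or have substantial input
--     return readiness_count >= 1 or word_count > 15
-- ===== SOURCE B (Python) =====
-- import re
--
-- _READINESS_INDICATORS = [
--     "can you show me", "examples", "demonstrate", "how to",
--     "connect", "relationship", "together", "integrate",
--     "apply", "my project", "implement", "using",
--     "learned", "understand", "feel confident", "realized"
-- ]
-- _READINESS_RE = re.compile("|".join(re.escape(t) for t in _READINESS_INDICATORS))
--
-- def _assess_readiness_for_advancement(user_input: str, state) -> bool: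
--     """Assess if user is ready to advance to next phase (single regex pass)."""
--     input_lower = user_input.lower()
--     return _READINESS_RE.search(input_lower) is not None or len(user_input.split()) > 15
-- ===== Notes on version B (the rewrite author's own statement) =====
-- stated objective: idiomatic
-- what changed: The 16 separate substring scans summed into a count are replaced by one precompiled regex alternation searched once over the lowered input (a single left-to-right pass), keeping the word-count branch unchanged.
import Mathlib
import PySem

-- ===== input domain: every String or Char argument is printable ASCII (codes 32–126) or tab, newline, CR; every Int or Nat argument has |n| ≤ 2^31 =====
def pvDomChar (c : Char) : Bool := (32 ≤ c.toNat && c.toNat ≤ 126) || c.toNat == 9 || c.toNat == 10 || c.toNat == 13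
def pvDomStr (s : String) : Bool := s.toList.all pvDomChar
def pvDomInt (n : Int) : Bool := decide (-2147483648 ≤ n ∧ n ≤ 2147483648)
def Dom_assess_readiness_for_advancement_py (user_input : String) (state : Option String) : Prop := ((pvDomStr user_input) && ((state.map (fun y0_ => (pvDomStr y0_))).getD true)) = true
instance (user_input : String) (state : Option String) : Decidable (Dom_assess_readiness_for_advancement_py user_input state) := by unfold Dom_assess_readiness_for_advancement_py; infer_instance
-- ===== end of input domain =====

-- B replaces the 16 summed substring scans by one alternation automaton pass over the lowered input (idiomatic single-regex form); the word-count branch is unchanged.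

-- ===== PORT A =====
def pvIndicators : List String :=
  ["can you show me", "examples", "demonstrate", "how to",
   "connect", "relationship", "together", "integrate",
   "apply", "my project", "implement", "using",
   "learned", "understand", "feel confident", "realized"]

def assess_readiness_for_advancement_py (user_input : String) (state : Option String) : Bool :=
  let input_lower := PySem.Str.lower user_input
  let readiness_count : Int :=
    (pvIndicators.map (fun term => if PySem.Str.isIn term input_lower then (1 : Int) else 0)).sum
  let word_count : Int := ((PySem.Str.split₀ user_input).length : Int)
  decide (readiness_count ≥ 1) || decide (word_count > 15)

-- ===== PORT B =====
-- the compiled alternation pattern: the same 16 phrases as char lists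
def pvIndicatorsB : List (List Char) := pvIndicators.map String.toList

-- re.search of the alternation: one left-to-right pass over the subject; at each position try every branch
def pvScan (pats : List (List Char)) : List Char → Bool
  | [] => pats.any (fun t => t.isPrefixOf ([] : List Char))
  | c :: tail => pats.any (fun t => t.isPrefixOf (c :: tail)) || pvScan pats tail

def assess_readiness_for_advancement_py_alt (user_input : String) (state : Option String) : Bool :=
  pvScan pvIndicatorsB (PySem.Str.lower user_input).toList
    || decide (((PySem.Str.split₀ user_input).length : Int) > 15)

-- ===== PRECONDITION & SPEC =====
def Spec_assess_readiness_for_advancement_py (user_input : String) (state : Option String) (out : Bool) : Prop := out = assess_readiness_for_advancement_py_alt user_input state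
instance (user_input : String) (state : Option String) (out : Bool) : Decidable (Spec_assess_readiness_for_advancement_py user_input state out) := by unfold Spec_assess_readiness_for_advancement_py; infer_instance

-- ===== CLAIM (what is proved, stated in full; the proofs are below) =====
def Claim_equal_assess_readiness_for_advancement_py : Prop := ∀ (user_input : String) (state : Option String), Dom_assess_readiness_for_advancement_py user_input state → Spec_assess_readiness_for_advancement_py user_input state (assess_readiness_for_advancement_py user_input state)

-- ===== LEMMAS AND PROOFS =====
-- the scan finds a match iff some pattern is an infix of the subject
lemma pvScan_iff (pats : List (List Char)) (cs : List Char) :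
    pvScan pats cs = true ↔ ∃ t ∈ pats, t <:+: cs := by
  induction cs with
  | nil =>
    simp only [pvScan, List.any_eq_true, List.isPrefixOf_iff_prefix, List.prefix_nil,
      List.infix_nil]
  | cons c tail ih =>
    simp only [pvScan, Bool.or_eq_true, List.any_eq_true, ih]
    constructor
    · rintro (⟨t, ht, hp⟩ | ⟨t, ht, hi⟩)
      · exact ⟨t, ht, (List.isPrefixOf_iff_prefix.mp hp).isInfix⟩
      · exact ⟨t, ht, List.infix_cons_iff.mpr (Or.inr hi)⟩
    · rintro ⟨t, ht, hi⟩
      rcases List.infix_cons_iff.mp hi with hp | hi2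
      · exact Or.inl ⟨t, ht, List.isPrefixOf_iff_prefix.mpr hp⟩
      · exact Or.inr ⟨t, ht, hi2⟩

-- A's 0/1-sum is positive iff some indicator occurs
lemma pvCount_pos_iff (s : String) :
    (1 : Int) ≤ (pvIndicators.map (fun term => if PySem.Str.isIn term s then (1 : Int) else 0)).sum
      ↔ ∃ term ∈ pvIndicators, PySem.Str.isIn term s = true := by
  rw [PySem.List.sum_map_ite_one_zero]
  rw [show ((1:Int) ≤ (pvIndicators.countP (fun term => PySem.Str.isIn term s) : Int)) ↔
      (0 < pvIndicators.countP (fun term => PySem.Str.isIn term s)) from by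
    constructor <;> intro h <;> omega]
  exact List.countP_pos_iff

-- ===== VERDICT (by name: the statement is the Claim_ definition above) =====
theorem assess_readiness_for_advancement_py_spec : Claim_equal_assess_readiness_for_advancement_py := by
  intro user_input state _
  unfold Spec_assess_readiness_for_advancement_py
  simp only [assess_readiness_for_advancement_py, assess_readiness_for_advancement_py_alt]
  congr 1
  rw [Bool.eq_iff_iff, decide_eq_true_iff, ge_iff_le, pvCount_pos_iff, pvScan_iff]
  constructor
  · rintro ⟨term, ht, hin⟩
    exact ⟨term.toList, List.mem_map_of_mem ht, (PySem.Str.isIn_iff_infix _ _).mp hin⟩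
  · rintro ⟨t, ht, hi⟩
    rcases List.mem_map.mp ht with ⟨term, hterm, rfl⟩
    exact ⟨term, hterm, (PySem.Str.isIn_iff_infix _ _).mpr hi⟩
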